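-- pv_equiv track=rewrite | github.com/austtorres/Intro-To-Data-Programming | Name-Matching/namematching_hw.py | name_distance
-- ===== SOURCE A (Python) =====
-- def hamming_distance(name_A, name_B):
--     """Determines the Hamming Distance between name_A and name_B"""
--
--     mismatch = 0
--
--   #checks to see if the letters in both names are the same in each corresponding index
--     for index in range(len(name_A)):
--       if name_A[index] != name_B[index]:
--
--         #indicates how many letters are different between the names
--         mismatch += 1
--
--     return mismatch
--
-- def name_distance(name_A, name_B):
--     """Indicates the distance between name_A and name_B even if the names are a different
--     length. If they are the same length the distance is simply their Hamming distance"""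
--
--     #Calls previous function if names are the same length
--     if len(name_A) == len(name_B):
--         return hamming_distance(name_A, name_B)
--
--         #function for when name_A is shorter than name_B
--         #adds the difference in the length of the names to the Hamming distance by appending it
--     elif len(name_A) < len(name_B):
--         distance = list()
--         for i in range(len(name_B) - len(name_A) + 1):
--             substring = (name_B[i:len(name_A)+i])
--
--             #adds difference in length to Hamming distance
--             distance.append(hamming_distance(substring, name_A))
--         return min(distance) + len(name_B)-len(name_A)
--
--         #The same function but for if name_B is shorter than name_A
--     else:
--         distance = list()
--         for i in range(len(name_A) - len(name_B) + 1):
--             substring = (name_A[i:len(name_B)+i])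
--             distance.append(hamming_distance(substring, name_B))
--         return min(distance) + len(name_A)-len(name_B)
-- ===== SOURCE B (Python) =====
-- def name_distance(name_A, name_B):
--     # Index the longer name by character -> sorted position list; for each index i
--     # of the shorter name, binary-search the window of equal-character positions
--     # inside [i, i+d] and bump an offset histogram; the answer is
--     # len(short) - best histogram bin + length gap.
--     s, t = (name_A, name_B) if len(name_A) <= len(name_B) else (name_B, name_A)
--     d = len(t) - len(s)
--     pos = {}
--     for j, c in enumerate(t):
--         pos.setdefault(c, []).append(j)
--     cnt = [0] * (d + 1)
--     for i, c in enumerate(s):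
--         P = pos.get(c, [])
--         lo, hi = 0, len(P)
--         while lo < hi:  # first index with P[lo] >= i
--             mid = (lo + hi) // 2
--             if P[mid] < i:
--                 lo = mid + 1
--             else:
--                 hi = mid
--         while lo < len(P) and P[lo] <= i + d:
--             cnt[P[lo] - i] += 1
--             lo += 1
--     return len(s) - max(cnt) + d
-- ===== Notes on version B (the rewrite author's own statement) =====
-- stated objective: alternative
-- what changed: B replaces A's per-alignment slicing and Hamming rescans with an inverted index (char -> sorted positions in the longer name): for each index of the shorter name it binary-searches the window of equal-character positions and bumps an offset histogram, returning len(short) - max bin + length gap.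
import Mathlib
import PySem

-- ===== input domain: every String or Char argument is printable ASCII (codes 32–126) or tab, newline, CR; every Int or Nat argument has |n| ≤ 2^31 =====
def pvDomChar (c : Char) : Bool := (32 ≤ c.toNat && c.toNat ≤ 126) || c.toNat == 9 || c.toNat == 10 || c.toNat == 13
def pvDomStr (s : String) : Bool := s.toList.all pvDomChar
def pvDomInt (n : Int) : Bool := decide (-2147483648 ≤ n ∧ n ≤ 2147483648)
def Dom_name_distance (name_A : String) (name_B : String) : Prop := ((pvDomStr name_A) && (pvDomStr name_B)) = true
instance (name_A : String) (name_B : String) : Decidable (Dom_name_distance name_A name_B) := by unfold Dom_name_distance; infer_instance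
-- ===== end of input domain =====

-- B indexes the longer name by character (char -> position list) and fills an offset
-- histogram visiting only the equal-character pairs, a different algorithm from A's
-- per-alignment slicing and Hamming rescans.

-- ===== PORT A =====
-- helper `hamming_distance` of A
def pyHamming (name_A : String) (name_B : String) : Int :=
  (PySem.List.pyRange 0 (PySem.Str.len name_A)).foldl
    (fun mismatch idx =>
      if PySem.Str.pyGet? name_A idx ≠ PySem.Str.pyGet? name_B idx then mismatch + 1 else mismatch)
    0

def name_distance (name_A : String) (name_B : String) : Int :=
  if PySem.Str.len name_A = PySem.Str.len name_B then pyHamming name_A name_B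
  else if PySem.Str.len name_A < PySem.Str.len name_B then
    let distance := (PySem.List.pyRange 0 (PySem.Str.len name_B - PySem.Str.len name_A + 1)).foldl
      (fun acc i =>
        acc ++ [pyHamming (PySem.Str.slice name_B (some i) (some (PySem.Str.len name_A + i))) name_A])
      ([] : List Int)
    ((PySem.List.min? distance id).getD 0) + (PySem.Str.len name_B - PySem.Str.len name_A)
  else
    let distance := (PySem.List.pyRange 0 (PySem.Str.len name_A - PySem.Str.len name_B + 1)).foldl
      (fun acc i =>
        acc ++ [pyHamming (PySem.Str.slice name_A (some i) (some (PySem.Str.len name_B + i))) name_B])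
      ([] : List Int)
    ((PySem.List.min? distance id).getD 0) + (PySem.Str.len name_A - PySem.Str.len name_B)

-- ===== PORT B =====
-- B-side helpers: the two while-loops of Source B, ported step for step with a fuel bound
-- (fuel = initial hi / len(P); each loop strictly shrinks its measure, so the fuel is never exhausted)
-- (lo, hi = 0, len(P); while lo < hi: mid = (lo+hi)//2 ...; '//2' on these nonnegative ints is Nat division, exact)
def bsLoop (P : List Int) (i : Int) : Nat → Nat → Nat → Nat
  | 0, lo, _hi => lo
  | fuel + 1, lo, hi =>
    if lo < hi then
      let mid := (lo + hi) / 2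
      if PySem.List.pyGetD P (mid : Int) 0 < i then bsLoop P i fuel (mid + 1) hi
      else bsLoop P i fuel lo mid
    else lo

def walkLoop (P : List Int) (i bnd : Int) : Nat → Nat → List Int → List Int
  | 0, _lo, cnt => cnt
  | fuel + 1, lo, cnt =>
    if lo < P.length ∧ PySem.List.pyGetD P (lo : Int) 0 ≤ bnd then
      walkLoop P i bnd fuel (lo + 1)
        (PySem.List.pySetD cnt (PySem.List.pyGetD P (lo : Int) 0 - i)
          (PySem.List.pyGetD cnt (PySem.List.pyGetD P (lo : Int) 0 - i) 0 + 1))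
    else cnt

def name_distance_alt (name_A : String) (name_B : String) : Int :=
  let st := if name_A.toList.length ≤ name_B.toList.length
            then (name_A.toList, name_B.toList) else (name_B.toList, name_A.toList)
  let s := st.1
  let t := st.2
  let d := t.length - s.length
  -- pos = {}; for j, c in enumerate(t): pos.setdefault(c, []).append(j)
  let pos := (PySem.List.enumerate t).foldl
      (fun dct p => dct.modify p.2 [] (fun l => l ++ [p.1])) PySem.Dict.empty
  -- cnt = [0]*(d+1); for i, c in enumerate(s): binary-search P = pos.get(c, []) for the
  -- first index with P[lo] >= i (bsLoop), then walk the window P[lo] <= i+d (walkLoop)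
  let cnt := (PySem.List.enumerate s).foldl
      (fun cnt p =>
        let P := pos.getD p.2 []
        let lo := bsLoop P p.1 P.length 0 P.length
        walkLoop P p.1 (p.1 + (d : Int)) P.length lo cnt)
      (List.replicate (d + 1) (0 : Int))
  (s.length : Int) - ((PySem.List.max? cnt id).getD 0) + (d : Int)

-- ===== PRECONDITION & SPEC =====
def Spec_name_distance (name_A : String) (name_B : String) (out : Int) : Prop := out = name_distance_alt name_A name_B
instance (name_A : String) (name_B : String) (out : Int) : Decidable (Spec_name_distance name_A name_B out) := by unfold Spec_name_distance; infer_instance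

-- ===== CLAIM (what is proved, stated in full; the proofs are below) =====
def Claim_equal_name_distance : Prop := ∀ (name_A : String) (name_B : String), Dom_name_distance name_A name_B → Spec_name_distance name_A name_B (name_distance name_A name_B)

-- ===== LEMMAS AND PROOFS =====

-- number of aligned matches of s against t at offset k
def mcount (s t : List Char) (k : Nat) : Nat :=
  (List.range s.length).countP (fun i => t[i + k]? == s[i]?)

lemma pos_getD (t : List Char) (c : Char) :
    (((PySem.List.enumerate t).foldl
        (fun dct p => dct.modify p.2 [] (fun l => l ++ [p.1])) PySem.Dict.empty).getD c [])
    = ((List.range t.length).filter (fun j => t[j]? == some c)).map (fun (j : Nat) => (j : Int)) := by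
  have hswap : (PySem.List.enumerate t).foldl
      (fun dct p => dct.modify p.2 [] (fun l => l ++ [p.1])) PySem.Dict.empty
      = (((PySem.List.enumerate t).map (fun p => (p.2, p.1))).foldl
          (fun dct p => dct.modify p.1 [] (fun l => l ++ [p.2])) PySem.Dict.empty) := by
    rw [List.foldl_map]
  rw [hswap, PySem.Dict.getD_foldl_modify_append, PySem.Dict.getD_empty, List.nil_append]
  rw [PySem.List.enumerate_eq_map_pyRange t c, PySem.List.len_eq, PySem.List.pyRange_zero_natCast]
  rw [List.map_map, List.map_map, List.filter_map, List.map_map]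
  rw [List.filter_congr (q := fun j => t[j]? == some c) ?_]
  · exact List.map_congr_left (fun j _ => rfl)
  · intro j hj
    have hj' : j < t.length := List.mem_range.mp hj
    simp [Function.comp, PySem.List.pyGetD_natCast, List.getElem?_eq_getElem hj']

lemma bs_main (P : List Int) (i : Int)
    (hmono : ∀ a b : Nat, a ≤ b → b < P.length → P.getD a 0 ≤ P.getD b 0) :
    ∀ fuel lo hi, hi - lo ≤ fuel → lo ≤ hi → hi ≤ P.length →
    (∀ a, a < lo → P.getD a 0 < i) → (∀ b, hi ≤ b → b < P.length → i ≤ P.getD b 0) →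
    lo ≤ bsLoop P i fuel lo hi ∧ bsLoop P i fuel lo hi ≤ hi ∧
      (∀ a, a < bsLoop P i fuel lo hi → P.getD a 0 < i) ∧
      (∀ b, bsLoop P i fuel lo hi ≤ b → b < P.length → i ≤ P.getD b 0) := by
  intro fuel
  induction fuel with
  | zero =>
    intro lo hi hfuel hle hhi hbelow habove
    rw [bsLoop]
    exact ⟨le_refl _, hle, hbelow, fun b hb hbl => habove b (by omega) hbl⟩
  | succ fuel ih =>
    intro lo hi hfuel hle hhi hbelow habove
    rw [bsLoop]
    by_cases hlt : lo < hi
    · rw [if_pos hlt]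
      simp only []
      have hmidlen : (lo + hi) / 2 < P.length := by omega
      by_cases hmid : PySem.List.pyGetD P ((((lo + hi) / 2 : Nat)) : Int) 0 < i
      · rw [if_pos hmid]
        have hb' : ∀ a, a < (lo + hi) / 2 + 1 → P.getD a 0 < i := by
          intro a ha
          by_cases hal : a < lo
          · exact hbelow a hal
          · have hmm : P.getD a 0 ≤ P.getD ((lo + hi) / 2) 0 := hmono a _ (by omega) hmidlen
            have hm : P.getD ((lo + hi) / 2) 0 < i := by
              rwa [PySem.List.pyGetD_natCast] at hmid
            omega
        obtain ⟨h1, h2, h3, h4⟩ := ih ((lo + hi) / 2 + 1) hi (by omega) (by omega) hhi hb' habove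
        exact ⟨by omega, h2, h3, h4⟩
      · rw [if_neg hmid]
        have ha' : ∀ b, (lo + hi) / 2 ≤ b → b < P.length → i ≤ P.getD b 0 := by
          intro b hb hbl
          have hm : i ≤ P.getD ((lo + hi) / 2) 0 := by
            rw [PySem.List.pyGetD_natCast] at hmid
            omega
          have := hmono _ b hb hbl
          omega
        obtain ⟨h1, h2, h3, h4⟩ := ih lo ((lo + hi) / 2) (by omega) (by omega) (by omega) hbelow ha'
        exact ⟨h1, by omega, h3, h4⟩
    · rw [if_neg hlt]
      exact ⟨le_refl _, by omega, hbelow, fun b hb hbl => habove b (by omega) hbl⟩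

lemma walk_len (P : List Int) (i bnd : Int) :
    ∀ fuel lo cnt, (walkLoop P i bnd fuel lo cnt).length = cnt.length := by
  intro fuel
  induction fuel with
  | zero => intro lo cnt; rfl
  | succ fuel ih =>
    intro lo cnt
    rw [walkLoop]
    split
    · rw [ih, PySem.List.length_pySetD]
    · rfl

lemma walk_getD (P : List Int) (i : Int) (d k : Nat)
    (hmono : ∀ a b : Nat, a ≤ b → b < P.length → P.getD a 0 ≤ P.getD b 0)
    (hk : k ≤ d) :
    ∀ fuel lo cnt, P.length - lo ≤ fuel → cnt.length = d + 1 →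
    (∀ idx, lo ≤ idx → idx < P.length → i ≤ P.getD idx 0) →
    (walkLoop P i (i + (d : Int)) fuel lo cnt).getD k 0
      = cnt.getD k 0 + ((P.drop lo).countP (fun j => j == i + (k : Int)) : Int) := by
  intro fuel
  induction fuel with
  | zero =>
    intro lo cnt hfuel hlen hge
    have hd : P.drop lo = [] := List.drop_eq_nil_of_le (by omega)
    rw [walkLoop, hd]
    simp
  | succ fuel ih =>
    intro lo cnt hfuel hlen hge
    rw [walkLoop]
    by_cases h : lo < P.length ∧ PySem.List.pyGetD P (lo : Int) 0 ≤ i + (d : Int)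
    · rw [if_pos h]
      obtain ⟨hlo, hle⟩ := h
      have hjg : PySem.List.pyGetD P (lo : Int) 0 = P.getD lo 0 := PySem.List.pyGetD_natCast P lo 0
      have hige : i ≤ P.getD lo 0 := hge lo (le_refl _) hlo
      have hjle : P.getD lo 0 ≤ i + (d : Int) := by rw [hjg] at hle; exact hle
      have hnn : (0 : Int) ≤ PySem.List.pyGetD P (lo : Int) 0 - i := by rw [hjg]; omega
      have hdrop : P.drop lo = P[lo] :: P.drop (lo + 1) := List.drop_eq_getElem_cons hlo
      have hPg : P[lo] = P.getD lo 0 := (List.getD_eq_getElem P 0 hlo).symm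
      rw [ih (lo + 1) _ (by omega) (by rw [PySem.List.length_pySetD]; exact hlen)
          (fun idx hidx hidxl => hge idx (by omega) hidxl)]
      rw [PySem.List.pySetD_of_nonneg _ _ hnn, PySem.List.pyGetD_of_nonneg _ _ hnn, hjg]
      rw [hdrop, List.countP_cons]
      set jv := P.getD lo 0 with hjv
      by_cases he : jv = i + (k : Int)
      · have hik : (jv - i).toNat = k := by omega
        rw [hik]
        have hset : (cnt.set k (cnt.getD k 0 + 1)).getD k 0 = cnt.getD k 0 + 1 := by
          rw [List.getD_eq_getElem _ _ (by rw [List.length_set]; omega), List.getElem_set_self]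
        have hone : (if (P[lo] == i + (k : Int)) = true then 1 else 0) = 1 := by
          rw [hPg, he]; simp
        rw [hset, hone]
        push_cast
        ring
      · have hne : (jv - i).toNat ≠ k := by omega
        have hset : (cnt.set (jv - i).toNat (cnt.getD (jv - i).toNat 0 + 1)).getD k 0
            = cnt.getD k 0 := by
          simp [List.getD, List.getElem?_set_ne hne]
        have hzero : (if (P[lo] == i + (k : Int)) = true then 1 else 0) = 0 := by
          have hb : (P[lo] == i + (k : Int)) = false := by
            rw [hPg]; exact beq_eq_false_iff_ne.mpr he
          rw [hb]; simp
        rw [hset, hzero]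
        simp
    · rw [if_neg h]
      by_cases hlo : lo < P.length
      · have hgt : i + (d : Int) < P.getD lo 0 := by
          by_contra hcon
          exact h ⟨hlo, by rw [PySem.List.pyGetD_natCast]; omega⟩
        have hzero : (P.drop lo).countP (fun j => j == i + (k : Int)) = 0 := by
          rw [List.countP_eq_zero]
          intro x hx
          obtain ⟨idx, hidx, hxe⟩ := List.mem_iff_getElem.mp hx
          have hidx' : lo + idx < P.length := by
            have := List.length_drop (l := P) (i := lo); omega
          have hxg : x = P.getD (lo + idx) 0 := by
            rw [← hxe, List.getElem_drop, List.getD_eq_getElem _ _ hidx']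
          have hmo := hmono lo (lo + idx) (by omega) hidx'
          simp only [beq_iff_eq]
          omega
        rw [hzero]
        simp
      · have hd : P.drop lo = [] := List.drop_eq_nil_of_le (by omega)
        rw [hd]
        simp

lemma combo (P : List Int) (i : Int) (d k : Nat)
    (hsort : List.Pairwise (· < ·) P) (hk : k ≤ d) (cnt : List Int) (hlen : cnt.length = d + 1) :
    (walkLoop P i (i + (d : Int)) P.length (bsLoop P i P.length 0 P.length) cnt).getD k 0
      = cnt.getD k 0 + (P.countP (fun j => j == i + (k : Int)) : Int) := by
  have hmono : ∀ a b : Nat, a ≤ b → b < P.length → P.getD a 0 ≤ P.getD b 0 := by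
    intro a b hab hbl
    rcases Nat.lt_or_ge a b with hlt | hge
    · have := (List.pairwise_iff_getElem.mp hsort) a b (by omega) hbl hlt
      rw [List.getD_eq_getElem _ _ (by omega), List.getD_eq_getElem _ _ hbl]
      omega
    · have : a = b := by omega
      subst this; exact le_refl _
  obtain ⟨h1, h2, h3, h4⟩ := bs_main P i hmono P.length 0 P.length (by omega) (Nat.zero_le _)
    (le_refl _) (by intro a ha; omega) (by intro b hb hbl; omega)
  rw [walk_getD P i d k hmono hk _ _ cnt (by omega) hlen (fun idx hidx hidxl => h4 idx hidx hidxl)]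
  congr 1
  have hsplit : P = P.take (bsLoop P i P.length 0 P.length) ++ P.drop (bsLoop P i P.length 0 P.length) :=
    (List.take_append_drop _ _).symm
  have hzero : (P.take (bsLoop P i P.length 0 P.length)).countP (fun j => j == i + (k : Int)) = 0 := by
    rw [List.countP_eq_zero]
    intro x hx
    obtain ⟨idx, hidx, hxe⟩ := List.mem_iff_getElem.mp hx
    have hidxr : idx < bsLoop P i P.length 0 P.length := by
      have := List.length_take (i := bsLoop P i P.length 0 P.length) (l := P); omega
    have hidxl : idx < P.length := by
      have := List.length_take (i := bsLoop P i P.length 0 P.length) (l := P); omega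
    have hxg : x = P.getD idx 0 := by
      rw [← hxe, List.getElem_take, List.getD_eq_getElem _ _ hidxl]
    have := h3 idx hidxr
    simp only [beq_iff_eq]
    omega
  conv_rhs => rw [hsplit, List.countP_append]
  rw [hzero]
  simp

-- counting j = m among the first N naturals with q
lemma countP_range_beq (N m : Nat) (q : Nat → Bool) :
    (List.range N).countP (fun j => (j == m) && q j) = if m < N ∧ q m = true then 1 else 0 := by
  induction N with
  | zero => simp
  | succ N ih =>
    rw [List.range_succ, List.countP_append, ih, List.countP_singleton]
    by_cases hm : m < N
    · have hne : (N == m) = false := by simpa using (by omega : N ≠ m)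
      simp [hne, hm, Nat.lt_succ_of_lt hm]
    · by_cases he : N = m
      · subst he
        simp
      · have h2 : ¬ m < N + 1 := by omega
        have hne : (N == m) = false := by simpa using he
        simp [hm, h2, hne]

lemma cnt_eq (s t : List Char) (d : Nat) :
    ((PySem.List.enumerate s).foldl
      (fun cnt p =>
        walkLoop (((PySem.List.enumerate t).foldl
            (fun dct q => dct.modify q.2 [] (fun l => l ++ [q.1])) PySem.Dict.empty).getD p.2 [])
          p.1 (p.1 + (d : Int))
          (((PySem.List.enumerate t).foldl
            (fun dct q => dct.modify q.2 [] (fun l => l ++ [q.1])) PySem.Dict.empty).getD p.2 []).length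
          (bsLoop (((PySem.List.enumerate t).foldl
              (fun dct q => dct.modify q.2 [] (fun l => l ++ [q.1])) PySem.Dict.empty).getD p.2 [])
            p.1
            (((PySem.List.enumerate t).foldl
              (fun dct q => dct.modify q.2 [] (fun l => l ++ [q.1])) PySem.Dict.empty).getD p.2 []).length
            0
            (((PySem.List.enumerate t).foldl
              (fun dct q => dct.modify q.2 [] (fun l => l ++ [q.1])) PySem.Dict.empty).getD p.2 []).length)
          cnt)
      (List.replicate (d + 1) (0 : Int)))
    = (List.range (d + 1)).map
        (fun k => (((List.range s.length).countP (fun i => t[i + k]? == s[i]?)) : Int)) := by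
  have main : ∀ n, n ≤ s.length →
      ((List.range n).foldl
        (fun cnt (iN : Nat) =>
          walkLoop (((List.range t.length).filter
              (fun j => t[j]? == some (PySem.List.pyGetD s (iN : Int) 'a'))).map (fun (j : Nat) => (j : Int)))
            (iN : Int) ((iN : Int) + (d : Int))
            (((List.range t.length).filter
              (fun j => t[j]? == some (PySem.List.pyGetD s (iN : Int) 'a'))).map (fun (j : Nat) => (j : Int))).length
            (bsLoop (((List.range t.length).filter
                (fun j => t[j]? == some (PySem.List.pyGetD s (iN : Int) 'a'))).map (fun (j : Nat) => (j : Int)))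
              (iN : Int)
              (((List.range t.length).filter
                (fun j => t[j]? == some (PySem.List.pyGetD s (iN : Int) 'a'))).map (fun (j : Nat) => (j : Int))).length
              0
              (((List.range t.length).filter
                (fun j => t[j]? == some (PySem.List.pyGetD s (iN : Int) 'a'))).map (fun (j : Nat) => (j : Int))).length)
            cnt)
        (List.replicate (d + 1) (0 : Int)))
      = (List.range (d + 1)).map
          (fun k => (((List.range n).countP (fun i => t[i + k]? == s[i]?)) : Int)) := by
    intro n hn
    induction n with
    | zero => rw [List.range_zero]; simp [List.map_const']
    | succ n ih =>
      have hn' : n ≤ s.length := by omega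
      have hns : n < s.length := by omega
      conv_lhs => rw [List.range_succ]
      rw [List.foldl_append, ih hn', List.foldl_cons, List.foldl_nil]
      set M := (List.range (d + 1)).map
          (fun k => (((List.range n).countP (fun i => t[i + k]? == s[i]?)) : Int)) with hM
      have hMlen : M.length = d + 1 := by rw [hM, List.length_map, List.length_range]
      have hsort : List.Pairwise (· < ·)
          (((List.range t.length).filter
              (fun j => t[j]? == some (PySem.List.pyGetD s (n : Int) 'a'))).map (fun (j : Nat) => (j : Int))) :=
        List.pairwise_map.mpr (((List.pairwise_lt_range).filter _).imp (fun h => by exact_mod_cast h))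
      apply List.ext_getElem
      · rw [walk_len, hMlen, List.length_map, List.length_range]
      · intro k h1 h2
        have hk : k < d + 1 := by
          rw [walk_len, hMlen] at h1; exact h1
        rw [← List.getD_eq_getElem _ 0 h1, ← List.getD_eq_getElem _ 0 h2]
        rw [combo _ _ _ _ hsort (Nat.lt_succ_iff.mp hk) _ hMlen]
        rw [hM, PySem.List.getD_map_range _ _ _ _ hk, PySem.List.getD_map_range _ _ _ _ hk]
        have hsn : s[n]? = some (PySem.List.pyGetD s (n : Int) 'a') := by
          rw [PySem.List.pyGetD_natCast, List.getElem?_eq_getElem hns, List.getD_eq_getElem _ _ hns]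
        have hcount : (((List.range t.length).filter
              (fun j => t[j]? == some (PySem.List.pyGetD s (n : Int) 'a'))).map (fun (j : Nat) => (j : Int))).countP
                (fun j => j == (n : Int) + (k : Int))
            = (if t[n + k]? == some (PySem.List.pyGetD s (n : Int) 'a') then 1 else 0) := by
          rw [List.countP_map, List.countP_filter]
          have hcong : ∀ j ∈ List.range t.length,
              (((fun j => j == (n : Int) + (k : Int)) ∘ (fun j : Nat => (j : Int))) j
                && (t[j]? == some (PySem.List.pyGetD s (n : Int) 'a')))
              = ((j == n + k) && (t[j]? == some (PySem.List.pyGetD s (n : Int) 'a'))) := by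
            intro j _
            have hb : ((j : Int) == ((n : Int) + (k : Int))) = (j == n + k) := by
              by_cases hj : j = n + k
              · subst hj; push_cast; simp
              · have hji : ¬ ((j : Int) = (n : Int) + (k : Int)) := by omega
                simp [hj, hji]
            simp only [Function.comp]
            rw [hb]
          rw [List.countP_congr (fun j hj => by rw [hcong j hj]), countP_range_beq]
          by_cases hlt : n + k < t.length
          · simp [hlt]
          · simp [hlt]
        rw [hcount]
        rw [List.range_succ, List.countP_append, List.countP_singleton]
        rw [hsn]
        push_cast
        simp
  simp only [pos_getD]
  rw [PySem.List.enumerate_eq_map_pyRange s 'a', PySem.List.len_eq, PySem.List.pyRange_zero_natCast,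
      List.map_map, List.foldl_map]
  exact main s.length (le_refl _)

lemma pyHamming_eq (a b : String) :
    pyHamming a b =
      ((List.range a.toList.length).countP (fun i => !(a.toList[i]? == b.toList[i]?)) : Int) := by
  unfold pyHamming
  rw [PySem.Str.len_eq, PySem.List.pyRange_zero_natCast, List.foldl_map]
  have : ∀ (m : Int) (i : Nat),
      (if PySem.Str.pyGet? a (i : Int) ≠ PySem.Str.pyGet? b (i : Int) then m + 1 else m)
        = (if (!(a.toList[i]? == b.toList[i]?)) = true then m + 1 else m) := by
    intro m i; simp
  simp only [this]
  rw [PySem.List.foldl_count_if]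
  simp

lemma hamming_slice (S T : String) (k : Nat)
    (h : k + S.toList.length ≤ T.toList.length) :
    pyHamming (PySem.Str.slice T (some (k : Int)) (some ((S.toList.length : Int) + k))) S
      = (S.toList.length : Int) - (mcount S.toList T.toList k : Int) := by
  have hsub : (PySem.Str.slice T (some (k : Int)) (some ((S.toList.length : Int) + k))).toList
      = (T.toList.drop k).take S.toList.length := by
    rw [PySem.Str.toList_slice, PySem.Chars.slice_eq_listSlice]
    have h2 : ((S.toList.length : Int) + k) = ((S.toList.length + k : Nat) : Int) := by push_cast; ring
    rw [h2, PySem.List.slice_natCast]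
    congr 1
    omega
  have hlen : ((T.toList.drop k).take S.toList.length).length = S.toList.length := by
    rw [List.length_take, List.length_drop]; omega
  rw [pyHamming_eq, hsub, hlen]
  have hcong : (List.range S.toList.length).countP
        (fun i => !(((T.toList.drop k).take S.toList.length)[i]? == S.toList[i]?))
      = (List.range S.toList.length).countP (fun i => !(T.toList[i + k]? == S.toList[i]?)) := by
    apply List.countP_congr
    intro i hi
    have hi' : i < S.toList.length := List.mem_range.mp hi
    have hg : ((T.toList.drop k).take S.toList.length)[i]? = T.toList[i + k]? := by
      rw [List.getElem?_take_of_lt hi', List.getElem?_drop]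
      congr 1; omega
    rw [hg]
  rw [hcong]
  have hkey := List.length_eq_countP_add_countP (fun i => T.toList[i + k]? == S.toList[i]?)
      (l := List.range S.toList.length)
  have hnot : (List.range S.toList.length).countP
        (fun i => decide ¬((fun i => T.toList[i + k]? == S.toList[i]?) i = true))
      = (List.range S.toList.length).countP (fun i => !(T.toList[i + k]? == S.toList[i]?)) := by
    apply List.countP_congr; intro i _; simp
  rw [List.length_range] at hkey
  rw [hnot] at hkey
  unfold mcount
  omega

lemma minfold_sub (c : Int) (xs : List Int) (a : Int) :
    xs.foldl (fun m x => if c - x < m then c - x else m) (c - a)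
      = c - xs.foldl (fun m x => if m < x then x else m) a := by
  induction xs generalizing a with
  | nil => simp
  | cons x t ih =>
    simp only [List.foldl_cons]
    by_cases h : a < x
    · rw [if_pos (by omega), if_pos h, ih]
    · rw [if_neg (by omega), if_neg h, ih]

lemma foldl_opt_some (F : Option Int → Int → Option Int) (step : Int → Int → Int)
    (hF : ∀ m y, F (some m) y = some (step m y)) :
    ∀ (l : List Int) (a : Int), l.foldl F (some a) = some (l.foldl step a) := by
  intro l
  induction l with
  | nil => intro a; rfl
  | cons y t ih => intro a; rw [List.foldl_cons, hF, ih, List.foldl_cons]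

lemma min?_map_sub (c : Int) (x : Int) (xs : List Int) :
    (PySem.List.min? ((x :: xs).map (fun y => c - y)) id).getD 0
      = c - (PySem.List.max? (x :: xs) id).getD 0 := by
  unfold PySem.List.min? PySem.List.max?
  simp only [id_eq, List.map_cons, List.foldl_cons]
  rw [foldl_opt_some _ (fun m y => if y < m then y else m)
        (by intro m y; by_cases h : y < m <;> simp [h]),
      foldl_opt_some _ (fun m y => if m < y then y else m)
        (by intro m y; by_cases h : m < y <;> simp [h]),
      Option.getD_some, Option.getD_some, List.foldl_map]
  exact minfold_sub c xs x

-- pyHamming as length minus the offset-0 match count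
lemma pyHamming_eq_sub (a b : String) :
    pyHamming a b = (a.toList.length : Int) - (mcount a.toList b.toList 0 : Int) := by
  rw [pyHamming_eq]
  have hkey := List.length_eq_countP_add_countP (fun i => b.toList[i + 0]? == a.toList[i]?)
      (l := List.range a.toList.length)
  have hnot : (List.range a.toList.length).countP
        (fun i => decide ¬((fun i => b.toList[i + 0]? == a.toList[i]?) i = true))
      = (List.range a.toList.length).countP (fun i => !(a.toList[i]? == b.toList[i]?)) := by
    apply List.countP_congr; intro i _
    simp [BEq.comm]
  rw [List.length_range, hnot] at hkey
  unfold mcount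
  omega

-- the sliding branch of A equals B's core when S is the shorter name
lemma slide_eq (S T : String) (h : S.toList.length ≤ T.toList.length) :
    ((PySem.List.min? ((PySem.List.pyRange 0 (PySem.Str.len T - PySem.Str.len S + 1)).foldl
        (fun acc i =>
          acc ++ [pyHamming (PySem.Str.slice T (some i) (some (PySem.Str.len S + i))) S])
        ([] : List Int)) id).getD 0) + (PySem.Str.len T - PySem.Str.len S)
    = (S.toList.length : Int) -
        ((PySem.List.max?
          ((PySem.List.enumerate S.toList).foldl
            (fun cnt p =>
              walkLoop (((PySem.List.enumerate T.toList).foldl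
                  (fun dct q => dct.modify q.2 [] (fun l => l ++ [q.1]))
                  PySem.Dict.empty).getD p.2 [])
                p.1 (p.1 + ((T.toList.length - S.toList.length : Nat) : Int))
                (((PySem.List.enumerate T.toList).foldl
                  (fun dct q => dct.modify q.2 [] (fun l => l ++ [q.1]))
                  PySem.Dict.empty).getD p.2 []).length
                (bsLoop (((PySem.List.enumerate T.toList).foldl
                    (fun dct q => dct.modify q.2 [] (fun l => l ++ [q.1]))
                    PySem.Dict.empty).getD p.2 [])
                  p.1
                  (((PySem.List.enumerate T.toList).foldl
                    (fun dct q => dct.modify q.2 [] (fun l => l ++ [q.1]))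
                    PySem.Dict.empty).getD p.2 []).length
                  0
                  (((PySem.List.enumerate T.toList).foldl
                    (fun dct q => dct.modify q.2 [] (fun l => l ++ [q.1]))
                    PySem.Dict.empty).getD p.2 []).length)
                cnt)
            (List.replicate ((T.toList.length - S.toList.length) + 1) (0 : Int))) id).getD 0)
        + ((T.toList.length - S.toList.length : Nat) : Int) := by
  set sl := S.toList.length with hsl
  set tl := T.toList.length with htl
  set d := tl - sl with hd
  have hlen : (PySem.Str.len T - PySem.Str.len S + 1) = ((d + 1 : Nat) : Int) := by
    rw [PySem.Str.len_eq, PySem.Str.len_eq, ← hsl, ← htl]; push_cast; omega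
  have hgap : (PySem.Str.len T - PySem.Str.len S) = ((d : Nat) : Int) := by
    rw [PySem.Str.len_eq, PySem.Str.len_eq, ← hsl, ← htl]; omega
  rw [hlen, hgap, PySem.List.pyRange_zero_natCast]
  rw [PySem.List.foldl_append_singleton_eq_map, List.nil_append, List.map_map]
  have hmapeq : (List.range (d + 1)).map
        ((fun i => pyHamming (PySem.Str.slice T (some i) (some (PySem.Str.len S + i))) S) ∘ (fun k : Nat => (k : Int)))
      = ((List.range (d + 1)).map (fun k => (mcount S.toList T.toList k : Int))).map
          (fun y => (sl : Int) - y) := by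
    rw [List.map_map]
    apply List.map_congr_left
    intro k hk
    have hk' : k < d + 1 := List.mem_range.mp hk
    have : PySem.Str.len S = ((sl : Nat) : Int) := by rw [PySem.Str.len_eq, ← hsl]
    simp only [Function.comp_apply, this]
    exact hamming_slice S T k (by omega)
  rw [hmapeq, cnt_eq]
  obtain ⟨y, ys, hys⟩ : ∃ y ys, (List.range (d + 1)).map (fun k => (mcount S.toList T.toList k : Int)) = y :: ys := by
    rcases hE : (List.range (d + 1)).map (fun k => (mcount S.toList T.toList k : Int)) with _ | ⟨y, ys⟩
    · exact absurd (congrArg List.length hE) (by simp)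
    · exact ⟨y, ys, rfl⟩
  have hco : (List.range (d + 1)).map
        (fun k => ((List.countP (fun i => T.toList[i + k]? == S.toList[i]?) (List.range sl) : Nat) : Int))
      = (List.range (d + 1)).map (fun k => (mcount S.toList T.toList k : Int)) := by
    apply List.map_congr_left; intro k _
    unfold mcount; rw [← hsl]
  rw [hco, hys, min?_map_sub]

-- ===== VERDICT (by name: the statement is the Claim_ definition above) =====
theorem name_distance_spec : Claim_equal_name_distance := by
  intro A B _
  unfold Spec_name_distance name_distance name_distance_alt
  by_cases h1 : PySem.Str.len A = PySem.Str.len B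
  · have hl : A.toList.length = B.toList.length := by
      rw [PySem.Str.len_eq, PySem.Str.len_eq] at h1; exact_mod_cast h1
    have hle : A.toList.length ≤ B.toList.length := le_of_eq hl
    rw [if_pos h1]
    simp only [if_pos hle]
    rw [cnt_eq]
    have hd : B.toList.length - A.toList.length = 0 := by omega
    rw [hd]
    have h0 : (List.range (0 + 1)).map
        (fun k => ((List.countP (fun i => B.toList[i + k]? == A.toList[i]?) (List.range A.toList.length) : Nat) : Int))
        = [(mcount A.toList B.toList 0 : Int)] := by
      simp [List.range_succ, mcount]
    rw [h0, pyHamming_eq_sub]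
    simp [PySem.List.max?]
  · rw [if_neg h1]
    by_cases h2 : PySem.Str.len A < PySem.Str.len B
    · have hl : A.toList.length ≤ B.toList.length := by
        rw [PySem.Str.len_eq, PySem.Str.len_eq] at h2; exact_mod_cast le_of_lt h2
      rw [if_pos h2]
      simp only [if_pos hl]
      exact slide_eq A B hl
    · have hl : ¬ (A.toList.length ≤ B.toList.length) := by
        rw [PySem.Str.len_eq, PySem.Str.len_eq] at h1 h2
        intro hc
        rcases lt_or_eq_of_le hc with hlt | heq
        · exact h2 (by exact_mod_cast hlt)
        · exact h1 (by exact_mod_cast heq)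
      rw [if_neg h2]
      simp only [if_neg hl]
      exact slide_eq B A (le_of_lt (not_le.mp hl))
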